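-- pv_equiv track=rewrite | github.com/ipetrushenko-softheme/codejam | implementation/50-214A.py | solve
-- ===== SOURCE A (Python) =====
-- def solve(n: int, m: int) -> int:
--     k = max(n, m)
--     cnt = 0
--     for a in range(k+1):
--         for b in range(k+1):
--             if a*a + b == n and a + b*b == m:
--                 cnt += 1
--     return cnt
-- ===== SOURCE B (Python) =====
-- def solve(n: int, m: int) -> int:
--     # While a*a <= n, the first equation forces b = n - a*a >= 0; b <= max(n,m)
--     # and a <= max(n,m) hold automatically, so only the second equation is checked.
--     cnt = 0
--     a = 0
--     while a * a <= n:
--         b = n - a * a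
--         if a + b * b == m:
--             cnt += 1
--         a += 1
--     return cnt
-- ===== Notes on version B (the rewrite author's own statement) =====
-- stated objective: faster
-- what changed: Replaces A's nested O(k^2) scan over all (a,b) pairs by a while loop that stops once a*a exceeds n, deriving the unique b = n - a*a forced by the first equation and checking only the second.
import Mathlib
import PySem

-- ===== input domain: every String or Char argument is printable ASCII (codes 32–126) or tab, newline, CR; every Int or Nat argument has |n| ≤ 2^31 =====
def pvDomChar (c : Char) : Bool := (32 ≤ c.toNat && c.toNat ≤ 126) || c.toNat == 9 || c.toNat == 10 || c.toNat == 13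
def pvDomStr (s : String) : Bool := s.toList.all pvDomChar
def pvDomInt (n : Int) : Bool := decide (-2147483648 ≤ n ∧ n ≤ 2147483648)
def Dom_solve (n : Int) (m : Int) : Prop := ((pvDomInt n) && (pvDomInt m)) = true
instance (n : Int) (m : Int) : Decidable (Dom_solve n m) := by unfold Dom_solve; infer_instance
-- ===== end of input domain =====

-- B replaces A's nested scan over all (a,b) pairs by a while loop over a that stops
-- once a*a exceeds n and derives the unique b = n - a*a forced by the first equation.

-- ===== PORT A =====
def solve (n : Int) (m : Int) : Int :=
  let k := max n m
  (PySem.List.pyRange 0 (k + 1) 1).foldl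
    (fun cnt a =>
      (PySem.List.pyRange 0 (k + 1) 1).foldl
        (fun cnt b => if a * a + b = n ∧ a + b * b = m then cnt + 1 else cnt) cnt)
    0

-- ===== PORT B =====
-- every Int a satisfies a ≤ a*a (needed by the loop's termination measure)
theorem int_le_mul_self (a : Int) : a ≤ a * a := by nlinarith [sq_nonneg a, sq_nonneg (a - 1)]

-- the `while a*a <= n` loop of Source B, carrying (a, cnt)
def solveAltLoop (n : Int) (m : Int) (a : Int) (cnt : Int) : Int :=
  if h : a * a ≤ n then
    let b := n - a * a
    solveAltLoop n m (a + 1) (if a + b * b = m then cnt + 1 else cnt)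
  else cnt
termination_by (n + 1 - a).toNat
decreasing_by
  have := int_le_mul_self a
  omega

def solve_alt (n : Int) (m : Int) : Int := solveAltLoop n m 0 0

-- ===== PRECONDITION & SPEC =====
def Spec_solve (n : Int) (m : Int) (out : Int) : Prop := out = solve_alt n m
instance (n : Int) (m : Int) (out : Int) : Decidable (Spec_solve n m out) := by unfold Spec_solve; infer_instance

-- ===== CLAIM (what is proved, stated in full; the proofs are below) =====
def Claim_equal_solve : Prop := ∀ (n : Int) (m : Int), Dom_solve n m → Spec_solve n m (solve n m)

-- ===== LEMMAS AND PROOFS =====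

-- counting fold = start + countP
theorem foldl_count_ite {α : Type} (p : α → Prop) [DecidablePred p] :
    ∀ (L : List α) (c : Int),
      L.foldl (fun c b => if p b then c + 1 else c) c = c + (L.countP (fun b => decide (p b)) : Int) := by
  intro L
  induction L with
  | nil => intro c; simp
  | cons x xs ih =>
    intro c
    simp only [List.foldl_cons, List.countP_cons]
    by_cases h : p x
    · simp [h, ih]; ring
    · simp [h, ih]

-- a nodup list holds at most one element satisfying a predicate that pins its value
theorem countP_unique {α : Type} [DecidableEq α] (p : α → Prop) [DecidablePred p] (c : α)
    (hp : ∀ x, p x → x = c) :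
    ∀ (L : List α), L.Nodup →
      L.countP (fun b => decide (p b)) = if c ∈ L ∧ p c then 1 else 0 := by
  intro L
  induction L with
  | nil => simp
  | cons x xs ih =>
    intro hnd
    have hnd' := hnd.of_cons
    have hx : x ∉ xs := (List.nodup_cons.mp hnd).1
    simp only [List.countP_cons, ih hnd', List.mem_cons]
    by_cases hpx : p x
    · have hxc : x = c := hp x hpx
      subst hxc
      simp [hpx, hx]
    · by_cases hpc : p c
      · have hne : x ≠ c := fun h => hpx (h ▸ hpc)
        simp [hpx, hpc, hne.symm]
      · simp [hpx, hpc]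

-- A's count = countP of the derived-b predicate over the outer range
theorem solve_eq_countP (n m : Int) :
    solve n m = ((PySem.List.pyRange 0 (max n m + 1) 1).countP
      (fun a => decide (a * a ≤ n ∧ a + (n - a * a) * (n - a * a) = m)) : Int) := by
  simp only [solve]
  have hstep : (fun (cnt a : Int) =>
      (PySem.List.pyRange 0 (max n m + 1) 1).foldl
        (fun cnt b => if a * a + b = n ∧ a + b * b = m then cnt + 1 else cnt) cnt)
      = (fun (cnt a : Int) =>
          if a * a ≤ n ∧ a + (n - a * a) * (n - a * a) = m then cnt + 1 else cnt) := by
    funext cnt a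
    rw [foldl_count_ite (fun b => a * a + b = n ∧ a + b * b = m)]
    rw [countP_unique (fun b => a * a + b = n ∧ a + b * b = m) (n - a * a)
        (by intro x hx; omega)
        _ (PySem.List.nodup_pyRange_one 0 (max n m + 1))]
    simp only [PySem.List.mem_pyRange_one]
    have hsq : 0 ≤ a * a := mul_self_nonneg a
    by_cases h : a * a ≤ n ∧ a + (n - a * a) * (n - a * a) = m
    · have hle : n ≤ max n m := le_max_left n m
      rw [if_pos (show (0 ≤ n - a * a ∧ n - a * a < max n m + 1) ∧
            a * a + (n - a * a) = n ∧ a + (n - a * a) * (n - a * a) = m from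
            ⟨⟨by omega, by omega⟩, by omega, h.2⟩), if_pos h]; ring
    · rw [if_neg (fun hc => h ⟨by omega, hc.2.2⟩), if_neg h]; ring
  rw [hstep, foldl_count_ite (fun a => a * a ≤ n ∧ a + (n - a * a) * (n - a * a) = m)]
  ring

-- B's while loop counts the same predicate over the tail range [a, max n m + 1)
theorem loop_eq_countP (n m : Int) :
    ∀ (fuel : Nat) (a cnt : Int), 0 ≤ a → (n + 1 - a).toNat ≤ fuel →
      solveAltLoop n m a cnt = cnt + ((PySem.List.pyRange a (max n m + 1) 1).countP
        (fun x => decide (x * x ≤ n ∧ x + (n - x * x) * (n - x * x) = m)) : Int) := by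
  intro fuel
  induction fuel with
  | zero =>
    intro a cnt ha hf
    have hgt : ¬ a * a ≤ n := by
      intro h; have := int_le_mul_self a; omega
    rw [solveAltLoop]
    simp only [hgt, dite_false]
    have hz : (PySem.List.pyRange a (max n m + 1) 1).countP
        (fun x => decide (x * x ≤ n ∧ x + (n - x * x) * (n - x * x) = m)) = 0 := by
      rw [List.countP_eq_zero]
      intro x hx
      rw [PySem.List.mem_pyRange_one] at hx
      simp only [decide_eq_true_eq, not_and]
      intro hxx
      exfalso
      have h1 : a ≤ x := hx.1
      have h2 : a * a ≤ x * x := mul_le_mul h1 h1 ha (by omega)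
      omega
    rw [hz]; simp
  | succ f ih =>
    intro a cnt ha hf
    by_cases h : a * a ≤ n
    · rw [solveAltLoop]
      simp only [h, dite_true]
      have haa : a ≤ a * a := int_le_mul_self a
      have hlt : a < max n m + 1 := by
        have := le_max_left n m; omega
      rw [ih (a + 1) _ (by omega) (by omega)]
      rw [PySem.List.pyRange_one_cons hlt, List.countP_cons]
      by_cases hc : a + (n - a * a) * (n - a * a) = m
      · simp only [hc, if_true]
        simp [h]
        omega
      · simp only [hc, if_false]
        simp [h]
    · rw [solveAltLoop]
      simp only [h, dite_false]
      have hz : (PySem.List.pyRange a (max n m + 1) 1).countP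
          (fun x => decide (x * x ≤ n ∧ x + (n - x * x) * (n - x * x) = m)) = 0 := by
        rw [List.countP_eq_zero]
        intro x hx
        rw [PySem.List.mem_pyRange_one] at hx
        simp only [decide_eq_true_eq, not_and]
        intro hxx
        exfalso
        have h2 : a * a ≤ x * x := mul_le_mul hx.1 hx.1 ha (by omega)
        omega
      rw [hz]; simp

-- ===== VERDICT (by name: the statement is the Claim_ definition above) =====
theorem solve_spec : Claim_equal_solve := by
  intro n m _
  show solve n m = solve_alt n m
  rw [solve_eq_countP, solve_alt,
    loop_eq_countP n m (n + 1 - 0).toNat 0 0 le_rfl le_rfl]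
  ring
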